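-- pv_equiv track=rewrite | github.com/ali-sattari/aoc-2024 | 4/main.py | check_adjacent_chars
-- ===== SOURCE A (Python) =====
-- from typing import List, Tuple
--
-- def check_adjacent_chars(map: List, curr: Tuple) -> int:
--     res = 0
--     w, h = len(map[0]), len(map)
--     chars = ""
--     for point in get_points():
--         x, y = curr[0] + point[0], curr[1] + point[1]
--         if is_in_bounds(x, y, w, h):
--             chars += map[y][x]
--     if len(chars) > 1 and is_valid2(chars):
--         res += 1
--
--     return res
--
-- def get_points() -> List:
--     return [(-1,-1), (-1,1), (1,-1), (1,1)]
--
-- def is_valid2(s: str) -> bool: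
--     v = ["MMSS", "MSMS", "SMSM","SSMM"]
--     return s in v
--
-- def is_in_bounds(x, y: int, w, h: int) -> bool:
--     if x >= 0 and x < w and y >= 0 and y < h:
--        return True
--     return False
-- ===== SOURCE B (Python) =====
-- from typing import List, Tuple
--
-- def check_adjacent_chars(map: List, curr: Tuple) -> int:
--     h = len(map)
--     w = len(map[0])
--
--     def cell(dx, dy):
--         x, y = curr[0] + dx, curr[1] + dy
--         if 0 <= x < w and 0 <= y < h:
--             return map[y][x]
--         return None
--
--     def ms(a, b):
--         return (a == 'M' and b == 'S') or (a == 'S' and b == 'M')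
--
--     tl, bl, tr, br = cell(-1, -1), cell(-1, 1), cell(1, -1), cell(1, 1)
--     return 1 if ms(tl, br) and ms(bl, tr) else 0
-- ===== Notes on version B (the rewrite author's own statement) =====
-- stated objective: simpler
-- what changed: B reads the four diagonal corner cells directly and tests each diagonal for one 'M' and one 'S' with boolean logic, instead of accumulating a string over a point list and looking it up in a 4-element table of valid strings.
import Mathlib
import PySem

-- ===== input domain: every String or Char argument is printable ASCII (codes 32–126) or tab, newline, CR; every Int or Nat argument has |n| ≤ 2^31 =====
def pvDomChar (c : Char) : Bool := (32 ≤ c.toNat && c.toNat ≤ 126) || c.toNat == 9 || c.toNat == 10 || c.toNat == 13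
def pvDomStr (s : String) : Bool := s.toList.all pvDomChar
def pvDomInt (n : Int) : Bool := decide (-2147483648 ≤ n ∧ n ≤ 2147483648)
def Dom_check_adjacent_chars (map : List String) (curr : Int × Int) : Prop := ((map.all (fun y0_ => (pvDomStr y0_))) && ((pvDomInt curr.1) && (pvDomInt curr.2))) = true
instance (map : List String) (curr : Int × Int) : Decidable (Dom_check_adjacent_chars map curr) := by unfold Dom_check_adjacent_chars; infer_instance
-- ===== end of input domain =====

-- B reads the four diagonal corners directly and checks each diagonal holds one 'M' and one 'S',
-- replacing A's accumulated string and 4-string lookup table (objective: simpler; same cost).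


-- ===== PORT A =====
def pvGetPoints : List (Int × Int) := [(-1,-1), (-1,1), (1,-1), (1,1)]

def pvIsInBounds (x y w h : Int) : Bool :=
  if x ≥ 0 ∧ x < w ∧ y ≥ 0 ∧ y < h then true else false

def pvIsValid2 (s : List Char) : Bool :=
  let v : List (List Char) := [['M','M','S','S'], ['M','S','M','S'], ['S','M','S','M'], ['S','S','M','M']]
  v.contains s

def check_adjacent_chars (map : List String) (curr : Int × Int) : Int :=
  let res : Int := 0
  let w : Int := ((PySem.List.pyGet? map 0).getD "").toList.length   -- map[0] raises IndexError on []: excluded by Pre_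
  let h : Int := map.length
  let chars : List Char :=
    pvGetPoints.foldl (fun chars point =>
      let x := curr.1 + point.1
      let y := curr.2 + point.2
      if pvIsInBounds x y w h then
        -- map[y][x]: y is in range here; the char read raises IndexError on a ragged shorter row (excluded by Pre_)
        chars ++ (((PySem.Str.pyGet? ((PySem.List.pyGet? map y).getD "") x).map (fun c => [c])).getD [])
      else chars) []
  let res := if chars.length > 1 ∧ pvIsValid2 chars then res + 1 else res
  res

-- ===== PORT B =====
def pvCell (map : List String) (curr : Int × Int) (w : Int) (dx dy : Int) : Option Char :=
  let x := curr.1 + dx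
  let y := curr.2 + dy
  if 0 ≤ x ∧ x < w ∧ 0 ≤ y ∧ y < (map.length : Int) then
    PySem.Str.pyGet? ((PySem.List.pyGet? map y).getD "") x   -- map[y][x] raises on a ragged shorter row (excluded by Pre_)
  else none

def pvMs (a b : Option Char) : Bool :=
  (a == some 'M' && b == some 'S') || (a == some 'S' && b == some 'M')

def check_adjacent_chars_alt (map : List String) (curr : Int × Int) : Int :=
  let w : Int := ((PySem.List.pyGet? map 0).getD "").toList.length   -- map[0] raises IndexError on []: excluded by Pre_
  let tl := pvCell map curr w (-1) (-1)
  let bl := pvCell map curr w (-1) 1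
  let tr := pvCell map curr w 1 (-1)
  let br := pvCell map curr w 1 1
  if pvMs tl br && pvMs bl tr then 1 else 0

-- ===== PRECONDITION & SPEC =====
-- Pre_ excludes exactly the inputs where both Pythons raise IndexError: the empty map (map[0]) and maps where
-- an in-bounds corner (per the width of row 0) falls beyond the end of a shorter ragged row (map[y][x]).
def Pre_check_adjacent_chars (map : List String) (curr : Int × Int) : Prop :=
  map ≠ [] ∧
  ∀ p ∈ ([(-1,-1), (-1,1), (1,-1), (1,1)] : List (Int × Int)),
    (0 ≤ curr.1 + p.1 ∧ curr.1 + p.1 < ((map.headD "").toList.length : Int) ∧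
     0 ≤ curr.2 + p.2 ∧ curr.2 + p.2 < (map.length : Int)) →
    (curr.1 + p.1) < ((map.getD (curr.2 + p.2).toNat "").toList.length : Int)
instance (map : List String) (curr : Int × Int) : Decidable (Pre_check_adjacent_chars map curr) := by unfold Pre_check_adjacent_chars; infer_instance

def pvWitness_check_adjacent_chars : List String × (Int × Int) := (["MAM", "ASA", "SAS"], (1, 1))

def Spec_check_adjacent_chars (map : List String) (curr : Int × Int) (out : Int) : Prop := out = check_adjacent_chars_alt map curr
instance (map : List String) (curr : Int × Int) (out : Int) : Decidable (Spec_check_adjacent_chars map curr out) := by unfold Spec_check_adjacent_chars; infer_instance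

-- ===== CLAIM (what is proved, stated in full; the proofs are below) =====
def Claim_equal_check_adjacent_chars : Prop := ∀ (map : List String) (curr : Int × Int), Dom_check_adjacent_chars map curr → Pre_check_adjacent_chars map curr → Spec_check_adjacent_chars map curr (check_adjacent_chars map curr)

-- ===== LEMMAS AND PROOFS =====

-- the optional corner reads, as A concatenates them (none contributes nothing)
def pvG (o : Option Char) : List Char := (o.map (fun c => [c])).getD []

-- core fact: A's length-and-table test on the concatenation of the four optional corner
-- reads equals B's two diagonal checks on the same four optional reads.
set_option maxHeartbeats 1000000 in
lemma pvCore (o1 o2 o3 o4 : Option Char) :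
    (if (([] ++ pvG o1 ++ pvG o2 ++ pvG o3 ++ pvG o4).length > 1 ∧
         pvIsValid2 ([] ++ pvG o1 ++ pvG o2 ++ pvG o3 ++ pvG o4)) then (0:Int) + 1 else 0)
      = if pvMs o1 o4 && pvMs o2 o3 then 1 else 0 := by
  cases o1 <;> cases o2 <;> cases o3 <;> cases o4 <;>
    simp [pvG, pvMs, pvIsValid2] <;> split_ifs <;> tauto

-- ===== VERDICT (by name: the statement is the Claim_ definition above) =====
theorem check_adjacent_chars_spec : Claim_equal_check_adjacent_chars := by
  intro map curr _ _
  unfold Spec_check_adjacent_chars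
  have step : ∀ (P : Prop) [Decidable P] (l x : List Char),
      (if P then l ++ x else l) = l ++ (if P then x else []) := by
    intro P _ l x; split <;> simp
  have push : ∀ (P : Prop) [Decidable P] (o : Option Char),
      (if P then pvG o else []) = pvG (if P then o else none) := by
    intro P _ o; split <;> simp [pvG]
  unfold check_adjacent_chars check_adjacent_chars_alt pvCell pvIsInBounds
  simp only [pvGetPoints, List.foldl_cons, List.foldl_nil, ge_iff_le]
  rw [step, step, step, step]
  have bcond : ∀ (P : Prop) [inst : Decidable P], ((if P then true else false) = true) = P := by
    intro P inst; by_cases h : P <;> simp [h]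
  have gdef : ∀ (o : Option Char), (Option.getD (o.map (fun c => [c])) []) = pvG o := fun o => rfl
  simp only [bcond, gdef, push]
  exact pvCore _ _ _ _
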